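-- pv_equiv track=rewrite | github.com/wurthless-elektroniks/unpack64 | compression/rnc.py | _inverse_bits
-- ===== SOURCE A (Python) =====
-- def _inverse_bits(value, count):
--     i = 0
--     while count != 0:
--         i <<= 1
--         if (value & 1):
--             i |= 1
--         value >>= 1
--         count -= 1
--     return i
-- ===== SOURCE B (Python) =====
-- def _inverse_bits(value, count):
--     masked = value & ((1 << count) - 1)
--     return int(format(masked, '0{}b'.format(count))[::-1], 2)
-- ===== Notes on version B (the rewrite author's own statement) =====
-- stated objective: idiomatic
-- what changed: Replaces the shift-and-or accumulator loop by masking the low count bits, formatting them as a zero-padded binary string, reversing it with a slice and parsing it with int(s, 2).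
import Mathlib
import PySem

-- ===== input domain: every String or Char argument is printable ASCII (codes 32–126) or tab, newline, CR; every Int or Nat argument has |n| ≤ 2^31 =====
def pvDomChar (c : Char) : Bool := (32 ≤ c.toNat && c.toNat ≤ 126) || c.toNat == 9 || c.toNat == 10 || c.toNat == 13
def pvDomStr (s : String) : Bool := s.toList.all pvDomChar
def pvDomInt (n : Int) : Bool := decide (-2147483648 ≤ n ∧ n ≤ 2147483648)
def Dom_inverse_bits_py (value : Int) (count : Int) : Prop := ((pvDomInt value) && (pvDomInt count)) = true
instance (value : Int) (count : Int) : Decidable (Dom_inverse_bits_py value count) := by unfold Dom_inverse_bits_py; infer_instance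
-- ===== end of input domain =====

-- B replaces A's shift-and-or accumulator loop by mask / binary-string format / slice-reverse / int(s,2) (objective: idiomatic).

-- ===== PORT A =====
-- the while loop, with the (nonnegative, Pre_-guaranteed) count as fuel; Python's
-- `i <<= 1`, `value & 1`, `i |= 1`, `value >>= 1` are Int <<< 1, PySem.Int.band value 1,
-- PySem.Int.bor i 1, value >>> 1 (exact, incl. negatives).
def inverseBitsLoop (value : Int) (i : Int) : Nat → Int
  | 0 => i
  | n + 1 =>
      let i1 := i <<< (1 : Nat)
      let i2 := if PySem.Int.band value 1 ≠ 0 then PySem.Int.bor i1 1 else i1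
      inverseBitsLoop (value >>> (1 : Nat)) i2 n

def inverse_bits_py (value : Int) (count : Int) : Int :=
  inverseBitsLoop value 0 count.toNat

-- ===== PORT B =====
-- binary digits of a nonnegative int, most-significant first (Python's format(m, 'b'))
def pyBinAux (n : Nat) (acc : List Char) : List Char :=
  if n = 0 then acc else pyBinAux (n / 2) ((if n % 2 = 1 then '1' else '0') :: acc)

def pyBin (m : Nat) : List Char := if m = 0 then ['0'] else pyBinAux m []

-- Source B: masked = value & ((1 << count) - 1); int(format(masked, '0{count}b')[::-1], 2)
def inverse_bits_py_alt (value : Int) (count : Int) : Int :=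
  let w := count.toNat
  let masked := PySem.Int.band value ((1 : Int) <<< w - 1)
  let s := pyBin masked.toNat
  let padded := List.replicate (w - s.length) '0' ++ s     -- the '0{w}b' zero-padding
  padded.reverse.foldl (fun acc c => acc * 2 + (if c = '1' then 1 else 0)) 0   -- int(·, 2)

-- ===== PRECONDITION & SPEC =====
-- Pre_ excludes count < 0, on which Python A loops forever (never returns).
def Pre_inverse_bits_py (value : Int) (count : Int) : Prop := 0 ≤ count
instance (value : Int) (count : Int) : Decidable (Pre_inverse_bits_py value count) := by
  unfold Pre_inverse_bits_py; infer_instance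

def pvWitness_inverse_bits_py : Int × Int := (11, 4)

def Spec_inverse_bits_py (value : Int) (count : Int) (out : Int) : Prop := out = inverse_bits_py_alt value count
instance (value : Int) (count : Int) (out : Int) : Decidable (Spec_inverse_bits_py value count out) := by unfold Spec_inverse_bits_py; infer_instance

-- ===== CLAIM (what is proved, stated in full; the proofs are below) =====
def Claim_equal_inverse_bits_py : Prop := ∀ (value : Int) (count : Int), Dom_inverse_bits_py value count → Pre_inverse_bits_py value count → Spec_inverse_bits_py value count (inverse_bits_py value count)

-- ===== LEMMAS AND PROOFS =====

-- the low n bits of m, least-significant first, as characters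
def lsbChars : Nat → Nat → List Char
  | 0, _ => []
  | n + 1, m => (if m % 2 = 1 then '1' else '0') :: lsbChars n (m / 2)

-- the binary digits of m, least-significant first, no padding
def lsbPos (m : Nat) : List Char :=
  if m = 0 then [] else (if m % 2 = 1 then '1' else '0') :: lsbPos (m / 2)
decreasing_by exact Nat.div_lt_self (Nat.pos_of_ne_zero (by assumption)) (by omega)

theorem two_mul_lor_one (j : Nat) : (2*j) ||| 1 = 2*j + 1 := by
  apply Nat.eq_of_testBit_eq
  intro i
  rw [Nat.testBit_lor]
  cases i with
  | zero => simp [Nat.testBit_zero]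
  | succ i =>
      have h1 : (2*j)/2 = j := by omega
      have h2 : (2*j+1)/2 = j := by omega
      have h3 : (1:Nat)/2 = 0 := by omega
      simp [Nat.testBit_succ, h1, h2, h3]

theorem bor_one_of_even (a : Int) (h : a % 2 = 0) : PySem.Int.bor a 1 = a + 1 := by
  rw [PySem.Int.bor.eq_1]
  by_cases ha : 0 ≤ a
  · simp only [ha, if_true, (by norm_num : (0:Int) ≤ 1), if_true]
    have h1 : a.toNat = 2 * (a.toNat / 2) := by omega
    rw [show Int.toNat 1 = 1 from rfl, h1, two_mul_lor_one]
    omega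
  · simp only [ha, if_false, (by norm_num : (0:Int) ≤ 1), if_true]
    have hk : (-a - 1).toNat % 2 = 1 := by omega
    have h2 : (-a - 1).toNat &&& 1 = 1 := by rw [Nat.and_one_is_mod, hk]
    rw [show Int.toNat 1 = 1 from rfl, h2]
    omega

theorem band_one_emod (v : Int) : PySem.Int.band v 1 = v % 2 := by
  rw [PySem.Int.band_one, PySem.Int.mod.eq_1, Int.fmod_eq_emod]; simp

theorem band_mask (v : Int) (n : Nat) : PySem.Int.band v ((2 : Int) ^ n - 1) = v % (2 : Int) ^ n := by
  have hP : ((2:Int)^n) = ((2^n : Nat) : Int) := by push_cast; ring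
  have hp1 : (1:Nat) ≤ 2^n := Nat.one_le_two_pow
  have hm : (0:Int) ≤ (2:Int)^n - 1 := by rw [hP]; omega
  have hmt : ((2:Int)^n - 1).toNat = 2^n - 1 := by rw [hP]; omega
  rw [PySem.Int.band.eq_1]
  by_cases hv : 0 ≤ v
  · simp only [hv, if_true, hm, if_true, hmt]
    rw [Nat.and_two_pow_sub_one_eq_mod]
    have h1 : v = ((v.toNat : Nat) : Int) := by omega
    rw [h1, hP, ← Int.natCast_emod]
    simp
  · simp only [hv, if_false, hm, if_true, hmt]
    set k : Nat := (-v - 1).toNat with hk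
    rw [Nat.land_comm, Nat.and_two_pow_sub_one_eq_mod]
    have hkm : k % 2^n < 2^n := Nat.mod_lt _ (by omega)
    have hvk : v = -(k : Int) - 1 := by omega
    have hkint : (k : Int) = (2:Int)^n * ((k / 2^n : Nat) : Int) + ((k % 2^n : Nat) : Int) := by
      rw [hP]; exact_mod_cast (Nat.div_add_mod k (2^n)).symm
    have hv2 : v = (((2^n : Nat):Int) - 1 - ((k % 2^n : Nat) : Int)) + (2:Int)^n * (-((k / 2^n : Nat) : Int) - 1) := by
      rw [hvk, hkint, hP]; ring
    rw [hv2, Int.add_mul_emod_self_left,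
      Int.emod_eq_of_lt (by omega) (by rw [hP]; omega)]
    omega

theorem loop_eq_foldl (n : Nat) : ∀ (v i : Int),
    inverseBitsLoop v i n =
      (lsbChars n ((v % (2 : Int) ^ n).toNat)).foldl (fun acc c => acc * 2 + (if c = '1' then 1 else 0)) i := by
  induction n with
  | zero => intro v i; simp [inverseBitsLoop, lsbChars]
  | succ n ih =>
      intro v i
      have hpow : (2:Int) ^ (n+1) = 2 * 2 ^ n := by ring
      have hposn : (0:Int) < 2 ^ n := by positivity
      set q : Int := v % 2 ^ (n+1) with hqdef
      have hq0 : 0 ≤ q := Int.emod_nonneg v (by positivity)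
      have hq1 : q < 2 ^ (n+1) := Int.emod_lt_of_pos v (by positivity)
      have hq2 : q % 2 = v % 2 := Int.emod_emod_of_dvd v ⟨2 ^ n, by ring⟩
      have hk := Int.ediv_add_emod v (2 ^ (n+1))
      have hr : (2:Int) ^ (n+1) * (v / 2 ^ (n+1)) = 2 * (2 ^ n * (v / 2 ^ (n+1))) := by ring
      have hv : v = q + 2 * (2 ^ n * (v / 2 ^ (n+1))) := by rw [hqdef]; linarith [hk, hr]
      have hv2 : v / 2 = q / 2 + 2 ^ n * (v / 2 ^ (n+1)) := by
        conv_lhs => rw [hv]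
        rw [Int.add_mul_ediv_left _ _ (two_ne_zero)]
      have hmod : (v / 2) % 2 ^ n = q / 2 := by
        rw [hv2, Int.add_mul_emod_self_left, Int.emod_eq_of_lt (by omega) (by omega)]
      have hsl : i <<< (1:Nat) = i * 2 := by rw [Int.shiftLeft_eq]; norm_num
      have hsr : v >>> (1:Nat) = v / 2 := by rw [Int.shiftRight_eq_div_pow]; norm_num
      have hm2 : q.toNat % 2 = (v % 2).toNat := by omega
      have hmd : q.toNat / 2 = ((v / 2) % 2 ^ n).toNat := by omega
      rw [show inverseBitsLoop v i (n+1) = inverseBitsLoop (v >>> (1:Nat)) (if PySem.Int.band v 1 ≠ 0 then PySem.Int.bor (i <<< (1:Nat)) 1 else (i <<< (1:Nat))) n from rfl]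
      rw [show lsbChars (n+1) q.toNat = (if q.toNat % 2 = 1 then '1' else '0') :: lsbChars n (q.toNat / 2) from rfl]
      simp only [List.foldl_cons, hsl, hsr, band_one_emod, hm2, hmd]
      rw [ih]
      by_cases hvp : v % 2 = 1
      · have h1 : (v % 2).toNat = 1 := by omega
        simp only [hvp, h1, ne_eq, one_ne_zero, not_false_eq_true, if_true]
        rw [bor_one_of_even (i * 2) (by omega)]
        norm_num
      · have hv0 : v % 2 = 0 := by omega
        have h0 : (v % 2).toNat = 0 := by omega
        simp [hv0, h0]

theorem pyBinAux_eq (m : Nat) : ∀ (acc : List Char), pyBinAux m acc = (lsbPos m).reverse ++ acc := by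
  induction m using Nat.strong_induction_on with
  | _ m ih =>
      intro acc
      rw [pyBinAux, lsbPos]
      by_cases hm : m = 0
      · simp [hm]
      · simp only [hm, if_false]
        rw [ih (m / 2) (Nat.div_lt_self (Nat.pos_of_ne_zero hm) (by omega))]
        simp

theorem lsbChars_zero (n : Nat) : lsbChars n 0 = List.replicate n '0' := by
  induction n with
  | zero => rfl
  | succ n ih => simp [lsbChars, ih, List.replicate_succ]

theorem lsbChars_eq_pad (n : Nat) : ∀ (m : Nat), m < 2 ^ n →
    lsbChars n m = lsbPos m ++ List.replicate (n - (lsbPos m).length) '0' := by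
  induction n with
  | zero =>
      intro m h
      have : m = 0 := by omega
      subst this
      rw [lsbPos]
      simp [lsbChars]
  | succ n ih =>
      intro m h
      by_cases hm : m = 0
      · subst hm
        rw [lsbPos]
        simp [lsbChars_zero]
      · rw [show lsbChars (n+1) m = (if m % 2 = 1 then '1' else '0') :: lsbChars n (m / 2) from rfl]
        rw [lsbPos]
        simp only [hm, if_false]
        have hlt : m / 2 < 2 ^ n := by
          have : (2:Nat) ^ (n+1) = 2 * 2 ^ n := by ring
          omega
        rw [ih (m / 2) hlt]
        simp

-- ===== VERDICT (by name: the statement is the Claim_ definition above) =====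
theorem inverse_bits_py_spec : Claim_equal_inverse_bits_py := by
  intro value count _ hpre
  obtain ⟨n, rfl⟩ := Int.eq_ofNat_of_zero_le hpre
  unfold Spec_inverse_bits_py inverse_bits_py inverse_bits_py_alt
  simp only [Int.toNat_natCast]
  have hsl1 : (1:Int) <<< n = 2 ^ n := by rw [Int.shiftLeft_eq]; ring
  have hmask : PySem.Int.band value ((1:Int) <<< n - 1) = value % 2 ^ n := by
    rw [hsl1, band_mask]
  rw [loop_eq_foldl]
  simp only [hmask]
  have hP : ((2:Int)^n) = ((2^n : Nat) : Int) := by push_cast; ring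
  have hq0 : 0 ≤ value % 2 ^ n := Int.emod_nonneg value (by positivity)
  have hq1 : value % 2 ^ n < 2 ^ n := Int.emod_lt_of_pos value (by positivity)
  have hmlt : (value % (2:Int) ^ n).toNat < 2 ^ n := by rw [hP] at hq1; omega
  cases n with
  | zero =>
      have hp0 : (2:Int) ^ 0 = 1 := pow_zero 2
      have h0 : (value % (2:Int) ^ 0).toNat = 0 := by omega
      rw [h0]
      rfl
  | succ k =>
      generalize hg : (value % (2:Int) ^ (k+1)).toNat = m at hmlt ⊢
      by_cases hm0 : m = 0
      · subst hm0
        rw [show pyBin 0 = ['0'] from rfl, lsbChars_zero]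
        simp only [List.length_cons, List.length_nil]
        rw [List.reverse_append]
        simp [List.replicate_succ]
      · rw [show pyBin m = if m = 0 then ['0'] else pyBinAux m [] from rfl]
        simp only [hm0, if_false]
        rw [pyBinAux_eq m [], List.append_nil]
        rw [List.reverse_append, List.reverse_reverse, List.reverse_replicate, List.length_reverse]
        rw [lsbChars_eq_pad (k+1) m hmlt]
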